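-- pv_equiv track=rewrite | github.com/mapkpo/Tp-final-ED2 | Osciloscopio.py | bin8_to_dec3
-- ===== SOURCE A (Python) =====
-- def bin8_to_dec3(val):
--     tmp = int(val) & 0xFF
--     num2 = 0
--     num1 = 0
--     num0 = 0
--     while tmp >= 100:
--         tmp -= 100
--         num2 += 1
--     while tmp >= 10:
--         tmp -= 10
--         num1 += 1
--     num0 = tmp
--     return num2, num1, num0
-- ===== SOURCE B (Python) =====
-- def bin8_to_dec3(val):
--     tmp = int(val) & 0xFF
--     q, num0 = divmod(tmp, 10)
--     num2, num1 = divmod(q, 10)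
--     return num2, num1, num0
-- ===== Notes on version B (the rewrite author's own statement) =====
-- stated objective: idiomatic
-- what changed: Replaces the two repeated-subtraction while-loops with closed-form digit extraction via chained divmod on the masked byte.
import Mathlib
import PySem

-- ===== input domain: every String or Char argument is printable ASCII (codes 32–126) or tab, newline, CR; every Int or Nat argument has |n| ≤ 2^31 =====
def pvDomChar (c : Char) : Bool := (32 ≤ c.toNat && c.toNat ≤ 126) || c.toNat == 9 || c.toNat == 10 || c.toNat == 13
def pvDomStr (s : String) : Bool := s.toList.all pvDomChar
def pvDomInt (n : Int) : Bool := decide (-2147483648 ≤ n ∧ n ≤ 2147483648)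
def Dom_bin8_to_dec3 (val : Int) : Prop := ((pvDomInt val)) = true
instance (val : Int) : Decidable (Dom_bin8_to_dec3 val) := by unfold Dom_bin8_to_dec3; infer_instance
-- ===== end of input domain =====

-- B replaces A's repeated-subtraction digit loops with closed-form divmod digit extraction (idiomatic; same cost).


-- ===== PORT A =====
-- while tmp >= 100: tmp -= 100; num2 += 1
def loop100 (tmp cnt : Int) : Int × Int :=
  if h : 100 ≤ tmp then loop100 (tmp - 100) (cnt + 1) else (tmp, cnt)
termination_by tmp.toNat
decreasing_by omega

-- while tmp >= 10: tmp -= 10; num1 += 1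
def loop10 (tmp cnt : Int) : Int × Int :=
  if h : 10 ≤ tmp then loop10 (tmp - 10) (cnt + 1) else (tmp, cnt)
termination_by tmp.toNat
decreasing_by omega

def bin8_to_dec3 (val : Int) : Int × Int × Int :=
  let tmp := PySem.Int.band val 255        -- int(val) & 0xFF
  let r2 := loop100 tmp 0                  -- first while loop: (tmp, num2)
  let r1 := loop10 r2.1 0                  -- second while loop: (tmp, num1)
  (r2.2, r1.2, r1.1)

-- ===== PORT B =====
def bin8_to_dec3_alt (val : Int) : Int × Int × Int :=
  let tmp := PySem.Int.band val 255                       -- int(val) & 0xFF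
  -- divmod(tmp, 10) with nonzero literal divisor: Python floor division / mod
  let q := PySem.Int.floordiv tmp 10
  let num0 := PySem.Int.mod tmp 10
  let num2 := PySem.Int.floordiv q 10
  let num1 := PySem.Int.mod q 10
  (num2, num1, num0)

-- ===== PRECONDITION & SPEC =====
def Spec_bin8_to_dec3 (val : Int) (out : Int × Int × Int) : Prop := out = bin8_to_dec3_alt val
instance (val : Int) (out : Int × Int × Int) : Decidable (Spec_bin8_to_dec3 val out) := by unfold Spec_bin8_to_dec3; infer_instance

-- ===== CLAIM (what is proved, stated in full; the proofs are below) =====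
def Claim_equal_bin8_to_dec3 : Prop := ∀ (val : Int), Dom_bin8_to_dec3 val → Spec_bin8_to_dec3 val (bin8_to_dec3 val)

-- ===== LEMMAS AND PROOFS =====

theorem loop100_eq (tmp cnt : Int) (h : 0 ≤ tmp) :
    loop100 tmp cnt = (PySem.Int.mod tmp 100, cnt + PySem.Int.floordiv tmp 100) := by
  induction tmp, cnt using loop100.induct with
  | case1 tmp cnt hge ih =>
    rw [loop100, dif_pos hge, ih (by omega)]
    rw [PySem.Int.mod_eq_emod_of_pos (by omega), PySem.Int.mod_eq_emod_of_pos (by omega),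
        PySem.Int.floordiv_eq_ediv_of_pos (by omega), PySem.Int.floordiv_eq_ediv_of_pos (by omega)]
    simp only [Prod.mk.injEq]
    constructor <;> omega
  | case2 tmp cnt hlt =>
    rw [loop100, dif_neg hlt]
    rw [PySem.Int.mod_eq_emod_of_pos (by omega), PySem.Int.floordiv_eq_ediv_of_pos (by omega)]
    simp only [Prod.mk.injEq]
    constructor <;> omega

theorem loop10_eq (tmp cnt : Int) (h : 0 ≤ tmp) :
    loop10 tmp cnt = (PySem.Int.mod tmp 10, cnt + PySem.Int.floordiv tmp 10) := by
  induction tmp, cnt using loop10.induct with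
  | case1 tmp cnt hge ih =>
    rw [loop10, dif_pos hge, ih (by omega)]
    rw [PySem.Int.mod_eq_emod_of_pos (by omega), PySem.Int.mod_eq_emod_of_pos (by omega),
        PySem.Int.floordiv_eq_ediv_of_pos (by omega), PySem.Int.floordiv_eq_ediv_of_pos (by omega)]
    simp only [Prod.mk.injEq]
    constructor <;> omega
  | case2 tmp cnt hlt =>
    rw [loop10, dif_neg hlt]
    rw [PySem.Int.mod_eq_emod_of_pos (by omega), PySem.Int.floordiv_eq_ediv_of_pos (by omega)]
    simp only [Prod.mk.injEq]
    constructor <;> omega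

theorem band255_nonneg (val : Int) : 0 ≤ PySem.Int.band val 255 := by
  rw [PySem.Int.band_comm]
  exact PySem.Int.band_nonneg_of_nonneg_left val (by norm_num)

-- ===== VERDICT (by name: the statement is the Claim_ definition above) =====
theorem bin8_to_dec3_spec : Claim_equal_bin8_to_dec3 := by
  intro val _
  unfold Spec_bin8_to_dec3
  have h0 : 0 ≤ PySem.Int.band val 255 := band255_nonneg val
  simp only [bin8_to_dec3, bin8_to_dec3_alt]
  rw [loop100_eq _ 0 h0]
  rw [loop10_eq _ 0 (by
    rw [PySem.Int.mod_eq_emod_of_pos (b := 100) (by omega)]; omega)]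
  simp only [PySem.Int.mod_eq_emod_of_pos (by omega : (0:Int) < 100),
    PySem.Int.mod_eq_emod_of_pos (by omega : (0:Int) < 10),
    PySem.Int.floordiv_eq_ediv_of_pos (by omega : (0:Int) < 100),
    PySem.Int.floordiv_eq_ediv_of_pos (by omega : (0:Int) < 10),
    Prod.mk.injEq]
  refine ⟨by omega, by omega, by omega⟩
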